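-- pv_equiv track=rewrite | github.com/malikinss/portfolio | Python/Just Python/beegeek/Beegeek Python For Professionals/4_working_with_files/4.2_work_with_csv/4_2_12_sort_students_per_year_and_class/4_2_12_sort_students_per_year_and_class.py | sort_headers
-- ===== SOURCE A (Python) =====
-- from typing import List, Dict, Tuple
--
-- def sort_headers(headers: List[str]) -> List[str]:
--     """
--     Sorts the headers of the CSV file in the specified format.
--
--     Args:
--         headers (List[str]): The headers to sort.
--
--     Returns:
--         List[str]: The sorted headers.
--     """
--     classes_under_10 = []
--     classes_above_and_include_10 = []
--     result_headers = []
--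
--     for header in headers:
--         if len(header) == 3:
--             classes_under_10.append(header)
--         elif len(header) == 4 and header != 'year':
--             classes_above_and_include_10.append(header)
--         elif header == 'year':
--             result_headers.append(header)
--
--     result_headers += sorted(classes_under_10)
--     result_headers += sorted(classes_above_and_include_10)
--
--     return result_headers
-- ===== SOURCE B (Python) =====
-- def sort_headers(headers):
--     """Single stable keyed sort over the kept headers instead of three buckets."""
--     def key(h):
--         if h == 'year':
--             return (0, '')
--         if len(h) == 3:
--             return (1, h)
--         return (2, h)
--     return sorted([h for h in headers if len(h) in (3, 4)], key=key)
-- ===== Notes on version B (the rewrite author's own statement) =====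
-- stated objective: simpler
-- what changed: Replaces A's three explicit bucket lists plus two separate sorts and concatenations by one filter and a single stable keyed sort whose tuple key encodes the bucket order ('year' first, then length-3, then length-4 headers).
import Mathlib
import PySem

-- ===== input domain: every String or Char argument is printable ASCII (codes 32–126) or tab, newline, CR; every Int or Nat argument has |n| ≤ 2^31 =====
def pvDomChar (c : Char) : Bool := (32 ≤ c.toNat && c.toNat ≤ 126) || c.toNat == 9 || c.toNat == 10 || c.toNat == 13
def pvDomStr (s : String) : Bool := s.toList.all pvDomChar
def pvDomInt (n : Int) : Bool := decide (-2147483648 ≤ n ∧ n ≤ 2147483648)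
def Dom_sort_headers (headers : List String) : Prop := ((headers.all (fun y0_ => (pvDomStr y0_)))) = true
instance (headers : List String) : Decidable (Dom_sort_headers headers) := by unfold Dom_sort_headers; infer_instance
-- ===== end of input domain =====

-- B replaces A's three bucket lists and two separate sorts by one filter plus a single
-- stable keyed sort (objective: simpler decomposition, same behaviour).

-- ===== PORT A =====
def sort_headers (headers : List String) : List String :=
  let st := headers.foldl
    (fun (st : List String × List String × List String) header =>
      if PySem.Str.len header == 3 then (st.1 ++ [header], st.2.1, st.2.2)
      else if PySem.Str.len header == 4 && !(header == "year") then
        (st.1, st.2.1 ++ [header], st.2.2)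
      else if header == "year" then (st.1, st.2.1, st.2.2 ++ [header])
      else st)
    ([], [], [])
  st.2.2 ++ PySem.List.sorted st.1 (fun x => x) false
    ++ PySem.List.sorted st.2.1 (fun x => x) false

-- ===== PORT B =====
def sort_headers_alt (headers : List String) : List String :=
  PySem.List.sorted2
    (headers.filter (fun h => PySem.Str.len h == 3 || PySem.Str.len h == 4))
    (fun h => if h == "year" then (0 : Int) else if PySem.Str.len h == 3 then 1 else 2)
    (fun h => if h == "year" then "" else h)
    false

-- ===== PRECONDITION & SPEC =====
def Spec_sort_headers (headers : List String) (out : List String) : Prop := out = sort_headers_alt headers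
instance (headers : List String) (out : List String) : Decidable (Spec_sort_headers headers out) := by unfold Spec_sort_headers; infer_instance

-- ===== CLAIM (what is proved, stated in full; the proofs are below) =====
def Claim_equal_sort_headers : Prop := ∀ (headers : List String), Dom_sort_headers headers → Spec_sort_headers headers (sort_headers headers)

-- ===== LEMMAS AND PROOFS =====

-- insertion sort driven by an arbitrary comparator (the common core of sorted / sorted2)
def pvSortBy (before : String → String → Bool) (xs : List String) : List String :=
  xs.foldl (fun acc x => PySem.List.insertBy before x acc) []

-- B's comparator (what PySem.List.sorted2 uses for B's tuple key)
def pvLt (a b : String) : Bool :=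
  decide ((if a == "year" then (0 : Int) else if PySem.Str.len a == 3 then 1 else 2)
        < (if b == "year" then (0 : Int) else if PySem.Str.len b == 3 then 1 else 2))
  || (!decide ((if b == "year" then (0 : Int) else if PySem.Str.len b == 3 then 1 else 2)
        < (if a == "year" then (0 : Int) else if PySem.Str.len a == 3 then 1 else 2))
      && decide ((if a == "year" then "" else a) < (if b == "year" then "" else b)))

theorem pvSortBy_append_singleton (before : String → String → Bool) (xs : List String) (x : String) :
    pvSortBy before (xs ++ [x]) = PySem.List.insertBy before x (pvSortBy before xs) := by
  simp [pvSortBy]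

theorem mem_pvSortBy (before : String → String → Bool) (xs : List String) (y : String) :
    y ∈ pvSortBy before xs ↔ y ∈ xs := by
  induction xs using List.reverseRecOn with
  | nil => simp [pvSortBy]
  | append_singleton xs x ih =>
    rw [pvSortBy_append_singleton]
    simp [PySem.List.mem_insertBy, ih, or_comm]

theorem insertBy_app_right (before : String → String → Bool) (x : String) (ys zs : List String)
    (h : ∀ y ∈ ys, before x y = false) :
    PySem.List.insertBy before x (ys ++ zs) = ys ++ PySem.List.insertBy before x zs := by
  induction ys with
  | nil => simp
  | cons y ys ih =>
    have hy : before x y = false := h y (by simp)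
    simp [PySem.List.insertBy, hy, ih (fun z hz => h z (by simp [hz]))]

theorem insertBy_app_left (before : String → String → Bool) (x : String) (ys zs : List String)
    (h : ∀ z ∈ zs, before x z = true) :
    PySem.List.insertBy before x (ys ++ zs) = PySem.List.insertBy before x ys ++ zs := by
  induction ys with
  | nil =>
    cases zs with
    | nil => simp
    | cons z zs => simp [PySem.List.insertBy, h z (by simp)]
  | cons y ys ih =>
    by_cases hy : before x y = true
    · simp [PySem.List.insertBy, hy]
    · simp at hy
      simp [PySem.List.insertBy, hy, ih]

theorem pvSortBy_split (before : String → String → Bool) (p : String → Bool) (xs : List String)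
    (h : ∀ a ∈ xs, ∀ b ∈ xs, p a = true → p b = false → before a b = true ∧ before b a = false) :
    pvSortBy before xs =
      pvSortBy before (xs.filter p) ++ pvSortBy before (xs.filter (fun y => !p y)) := by
  induction xs using List.reverseRecOn with
  | nil => simp [pvSortBy]
  | append_singleton xs x ih =>
    have h' : ∀ a ∈ xs, ∀ b ∈ xs, p a = true → p b = false → before a b = true ∧ before b a = false :=
      fun a ha b hb => h a (by simp [ha]) b (by simp [hb])
    rw [pvSortBy_append_singleton, ih h']
    by_cases hp : p x = true
    · rw [insertBy_app_left before x _ _ ?_]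
      · simp [List.filter_append, hp, pvSortBy_append_singleton]
      · intro z hz
        rw [mem_pvSortBy] at hz
        have hzx : z ∈ xs := List.mem_of_mem_filter hz
        have hzp : p z = false := by
          have := List.of_mem_filter hz; simpa using this
        exact (h x (by simp) z (by simp [hzx]) hp hzp).1
    · simp at hp
      rw [insertBy_app_right before x _ _ ?_]
      · simp [List.filter_append, hp, pvSortBy_append_singleton]
      · intro y hy
        rw [mem_pvSortBy] at hy
        have hyx : y ∈ xs := List.mem_of_mem_filter hy
        have hyp : p y = true := List.of_mem_filter hy
        exact (h y (by simp [hyx]) x (by simp) hyp hp).2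

theorem insertBy_congr (b b' : String → String → Bool) (x : String) (ys : List String)
    (h : ∀ y ∈ ys, b x y = b' x y) :
    PySem.List.insertBy b x ys = PySem.List.insertBy b' x ys := by
  induction ys with
  | nil => rfl
  | cons y ys ih =>
    have hy : b x y = b' x y := h y (by simp)
    by_cases hxy : b' x y = true
    · simp [PySem.List.insertBy, hy, hxy]
    · simp at hxy
      simp [PySem.List.insertBy, hy, hxy, ih (fun z hz => h z (by simp [hz]))]

theorem pvSortBy_congr (before before' : String → String → Bool) (xs : List String)
    (h : ∀ a ∈ xs, ∀ b ∈ xs, before a b = before' a b) :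
    pvSortBy before xs = pvSortBy before' xs := by
  induction xs using List.reverseRecOn with
  | nil => rfl
  | append_singleton xs x ih =>
    rw [pvSortBy_append_singleton, pvSortBy_append_singleton,
      ih (fun a ha b hb => h a (by simp [ha]) b (by simp [hb]))]
    exact insertBy_congr _ _ _ _ (fun y hy =>
      h x (by simp) y (by simp [(mem_pvSortBy before' xs y).1 hy]))

-- characterisation of A's bucket-building loop
theorem pvLoopA (headers : List String) (u a r : List String) :
    headers.foldl
      (fun (st : List String × List String × List String) header =>
        if PySem.Str.len header == 3 then (st.1 ++ [header], st.2.1, st.2.2)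
        else if PySem.Str.len header == 4 && !(header == "year") then
          (st.1, st.2.1 ++ [header], st.2.2)
        else if header == "year" then (st.1, st.2.1, st.2.2 ++ [header])
        else st)
      (u, a, r)
    = (u ++ headers.filter (fun h => PySem.Str.len h == 3),
       a ++ headers.filter (fun h => PySem.Str.len h == 4 && !(h == "year")),
       r ++ headers.filter (fun h => h == "year")) := by
  induction headers generalizing u a r with
  | nil => simp
  | cons x xs ih =>
    have step : ∀ (u a r : List String),
        (if PySem.Str.len x == 3 then (u ++ [x], a, r)
         else if PySem.Str.len x == 4 && !(x == "year") then (u, a ++ [x], r)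
         else if x == "year" then (u, a, r ++ [x])
         else (u, a, r))
        = ((if PySem.Str.len x == 3 then u ++ [x] else u),
           (if PySem.Str.len x == 4 && !(x == "year") then a ++ [x] else a),
           (if x == "year" then r ++ [x] else r)) := by
      intro u a r
      by_cases h3 : (x.length : Int) = 3
      · have hy : ¬ x = "year" := fun e => by subst e; exact absurd h3 (by decide)
        have h4 : ¬ (x.length : Int) = 4 := by omega
        simp [h3, h4, hy]
      · by_cases h4 : (x.length : Int) = 4
        · by_cases hy : x = "year"
          · subst hy
            simp [show ¬(("year".length : Int)) = 3 by decide]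
          · simp [h3, h4, hy]
        · have hy : ¬ x = "year" := fun e => by subst e; exact absurd h4 (by decide)
          simp [h3, h4, hy]
    show List.foldl _
        (if PySem.Str.len x == 3 then (u ++ [x], a, r)
         else if PySem.Str.len x == 4 && !(x == "year") then (u, a ++ [x], r)
         else if x == "year" then (u, a, r ++ [x])
         else (u, a, r)) xs = _
    rw [step, ih]
    by_cases h3 : (x.length : Int) = 3
    · have hy : ¬ x = "year" := fun e => by subst e; exact absurd h3 (by decide)
      have h4 : ¬ (x.length : Int) = 4 := by omega
      simp [List.filter_cons, h3, h4, hy]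
    · by_cases h4 : (x.length : Int) = 4
      · by_cases hy : x = "year"
        · subst hy
          simp [List.filter_cons, show ¬(("year".length : Int)) = 3 by decide]
        · simp [List.filter_cons, h3, h4, hy]
      · have hy : ¬ x = "year" := fun e => by subst e; exact absurd h4 (by decide)
        simp [List.filter_cons, h3, h4, hy]

-- the filtered sublists of B coincide with A's buckets
theorem pv_filter_year (headers : List String) :
    ((headers.filter (fun h => PySem.Str.len h == 3 || PySem.Str.len h == 4)).filter
        (fun h => h == "year"))
      = headers.filter (fun h => h == "year") := by
  rw [List.filter_filter]
  refine List.filter_congr (fun h _ => ?_)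
  by_cases hy : h = "year"
  · subst hy; decide
  · simp [hy]

theorem pv_filter_len3 (headers : List String) :
    (((headers.filter (fun h => PySem.Str.len h == 3 || PySem.Str.len h == 4)).filter
        (fun y => !(y == "year"))).filter (fun h => PySem.Str.len h == 3))
      = headers.filter (fun h => PySem.Str.len h == 3) := by
  rw [List.filter_filter, List.filter_filter]
  refine List.filter_congr (fun h _ => ?_)
  by_cases h3 : (h.length : Int) = 3
  · have hy : ¬ h = "year" := fun e => by subst e; exact absurd h3 (by decide)
    simp [h3, hy]
  · have hb3 : ((h.length : Int) == 3) = false := by simp [h3]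
    simp [hb3]

theorem pv_filter_len4 (headers : List String) :
    (((headers.filter (fun h => PySem.Str.len h == 3 || PySem.Str.len h == 4)).filter
        (fun y => !(y == "year"))).filter (fun y => !(PySem.Str.len y == 3)))
      = headers.filter (fun h => PySem.Str.len h == 4 && !(h == "year")) := by
  rw [List.filter_filter, List.filter_filter]
  refine List.filter_congr (fun h _ => ?_)
  by_cases h3 : (h.length : Int) = 3
  · simp [h3]
  · by_cases h4 : (h.length : Int) = 4
    · simp [h3, h4]
    · have hb3 : ((h.length : Int) == 3) = false := by simp [h3]
      have hb4 : ((h.length : Int) == 4) = false := by simp [h4]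
      simp [hb3, hb4]

theorem pv_sorted2_eq (headers : List String) :
    sort_headers_alt headers
      = pvSortBy pvLt
          (headers.filter (fun h => PySem.Str.len h == 3 || PySem.Str.len h == 4)) := rfl

theorem pv_sorted_id_eq (xs : List String) :
    PySem.List.sorted xs (fun x => x) false = pvSortBy (fun a b => decide (a < b)) xs := rfl

theorem pvSortBy_of_all_false (before : String → String → Bool) (xs : List String)
    (h : ∀ a ∈ xs, ∀ b ∈ xs, before a b = false) :
    pvSortBy before xs = xs := by
  induction xs using List.reverseRecOn with
  | nil => simp [pvSortBy]
  | append_singleton xs x ih =>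
    rw [pvSortBy_append_singleton,
      ih (fun a ha b hb => h a (by simp [ha]) b (by simp [hb])),
      PySem.List.insertBy_of_forall_not_before]
    intro y hy
    exact h x (by simp) y (by simp [hy])

-- comparator facts for B's key
theorem pvLt_year (a b : String) (ha : (a == "year") = true) (hb : (b == "year") = false) :
    pvLt a b = true ∧ pvLt b a = false := by
  have ha' : a = "year" := by simpa using ha
  have hb' : ¬ b = "year" := by simpa using hb
  subst ha'
  by_cases h3 : (b.length : Int) = 3
  · constructor <;> simp [pvLt, hb', h3]
  · constructor <;> simp [pvLt, hb', h3]

theorem pvLt_len3_lt (a b : String) (hna : (a == "year") = false) (hnb : (b == "year") = false)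
    (h3a : (PySem.Str.len a == 3) = true) (h3b : (PySem.Str.len b == 3) = false) :
    pvLt a b = true ∧ pvLt b a = false := by
  have hna' : ¬ a = "year" := by simpa using hna
  have hnb' : ¬ b = "year" := by simpa using hnb
  have h3a' : (a.length : Int) = 3 := by simpa using h3a
  have h3b' : ¬ (b.length : Int) = 3 := by simpa using h3b
  constructor <;> simp [pvLt, hna', hnb', h3a', h3b']

theorem pvLt_eq_lt_len3 (a b : String) (hna : (a == "year") = false) (hnb : (b == "year") = false)
    (h3a : (PySem.Str.len a == 3) = true) (h3b : (PySem.Str.len b == 3) = true) :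
    pvLt a b = decide (a < b) := by
  have hna' : ¬ a = "year" := by simpa using hna
  have hnb' : ¬ b = "year" := by simpa using hnb
  have h3a' : (a.length : Int) = 3 := by simpa using h3a
  have h3b' : (b.length : Int) = 3 := by simpa using h3b
  simp [pvLt, hna', hnb', h3a', h3b']

theorem pvLt_eq_lt_len4 (a b : String) (hna : (a == "year") = false) (hnb : (b == "year") = false)
    (h3a : (PySem.Str.len a == 3) = false) (h3b : (PySem.Str.len b == 3) = false) :
    pvLt a b = decide (a < b) := by
  have hna' : ¬ a = "year" := by simpa using hna
  have hnb' : ¬ b = "year" := by simpa using hnb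
  have h3a' : ¬ (a.length : Int) = 3 := by simpa using h3a
  have h3b' : ¬ (b.length : Int) = 3 := by simpa using h3b
  simp [pvLt, hna', hnb', h3a', h3b']

theorem sort_headers_spec : Claim_equal_sort_headers := by
  intro headers _
  unfold Spec_sort_headers
  show sort_headers headers = sort_headers_alt headers
  unfold sort_headers
  rw [pvLoopA headers [] [] []]
  simp only [List.nil_append]
  rw [pv_sorted2_eq]
  rw [pvSortBy_split pvLt (fun h => h == "year") _
    (fun a _ b _ ha hb => pvLt_year a b ha hb)]
  rw [pvSortBy_of_all_false pvLt _ (fun a ha b hb => by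
    have ha' : (a == "year") = true := (List.mem_filter.mp ha).2
    have hb' : (b == "year") = true := (List.mem_filter.mp hb).2
    have ha2 : a = "year" := by simpa using ha'
    have hb2 : b = "year" := by simpa using hb'
    subst ha2; subst hb2; simp [pvLt])]
  rw [pvSortBy_split pvLt (fun h => PySem.Str.len h == 3) _
    (fun a ha b hb h3a h3b => by
      have hna : (!(a == "year")) = true := (List.mem_filter.mp ha).2
      have hnb : (!(b == "year")) = true := (List.mem_filter.mp hb).2
      exact pvLt_len3_lt a b (by simpa using hna) (by simpa using hnb) h3a h3b)]
  rw [pv_filter_year, pv_filter_len3, pv_filter_len4]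
  rw [pvSortBy_congr pvLt (fun a b => decide (a < b)) _
    (fun a ha b hb => by
      have h3a : (PySem.Str.len a == 3) = true := (List.mem_filter.mp ha).2
      have h3b : (PySem.Str.len b == 3) = true := (List.mem_filter.mp hb).2
      have hna : (a == "year") = false := by
        have : ¬ a = "year" := fun e => by
          rw [e] at h3a; exact absurd h3a (by decide)
        simpa using this
      have hnb : (b == "year") = false := by
        have : ¬ b = "year" := fun e => by
          rw [e] at h3b; exact absurd h3b (by decide)
        simpa using this
      exact pvLt_eq_lt_len3 a b hna hnb h3a h3b)]
  rw [pvSortBy_congr pvLt (fun a b => decide (a < b)) _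
    (fun a ha b hb => by
      have hqa : (PySem.Str.len a == 4 && !(a == "year")) = true := (List.mem_filter.mp ha).2
      have hqb : (PySem.Str.len b == 4 && !(b == "year")) = true := (List.mem_filter.mp hb).2
      rw [Bool.and_eq_true] at hqa hqb
      have h3a : (PySem.Str.len a == 3) = false := by
        have h4 : (a.length : Int) = 4 := by simpa using hqa.1
        simp; omega
      have h3b : (PySem.Str.len b == 3) = false := by
        have h4 : (b.length : Int) = 4 := by simpa using hqb.1
        simp; omega
      exact pvLt_eq_lt_len4 a b (by simpa using hqa.2) (by simpa using hqb.2) h3a h3b)]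
  rw [← pv_sorted_id_eq, ← pv_sorted_id_eq]
  simp [List.append_assoc]
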